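-- pv_equiv track=rewrite | github.com/aysanaghazadeh/PersuasiveAdVLMBenchmark | utils/data/data_util.py | process_and_merge_labels
-- ===== SOURCE A (Python) =====
-- from collections import Counter
--
-- def process_and_merge_labels(labels_array):
--     corrected_array = []
--     can_be_merged_count = 0
--     cannot_be_merged_count = 0
--
--     for label_str in labels_array:
--         # Split by comma and strip spaces
--         labels = [label.strip() for label in label_str.split(',')]
--         label_counts = Counter(labels)
--
--         # Find the label(s) with the highest frequency
--         max_freq = max(label_counts.values())
--         majority_labels = [label for label, freq in label_counts.items() if freq == max_freq]
--
--         # Check if there is a clear majority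
--         if len(majority_labels) == 1:
--             corrected_array.append(majority_labels[0])
--             can_be_merged_count += 1
--         else:
--             corrected_array.append(None)
--             cannot_be_merged_count += 1
--
--     return can_be_merged_count, cannot_be_merged_count, corrected_array
-- ===== SOURCE B (Python) =====
-- def process_and_merge_labels(labels_array):
--     corrected_array = []
--     can_be_merged_count = 0
--     cannot_be_merged_count = 0
--
--     for label_str in labels_array:
--         # sort the stripped labels, then scan runs of equal labels
--         labels = sorted(part.strip() for part in label_str.split(','))
--         best = None
--         best_len = 0
--         ties = 0
--         i = 0
--         n = len(labels)
--         while i < n: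
--             j = i + 1
--             while j < n and labels[j] == labels[i]:
--                 j += 1
--             run = j - i
--             if run > best_len:
--                 best_len, best, ties = run, labels[i], 1
--             elif run == best_len:
--                 ties += 1
--             i = j
--         if ties == 1:
--             corrected_array.append(best)
--             can_be_merged_count += 1
--         else:
--             corrected_array.append(None)
--             cannot_be_merged_count += 1
--
--     return can_be_merged_count, cannot_be_merged_count, corrected_array
-- ===== Notes on version B (the rewrite author's own statement) =====
-- stated objective: alternative
-- what changed: Replaces Counter + max + items-filter mode finding with sort-then-run-length scan: labels are sorted and a single run walk tracks the longest run and how many distinct labels attain it.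
import Mathlib
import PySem

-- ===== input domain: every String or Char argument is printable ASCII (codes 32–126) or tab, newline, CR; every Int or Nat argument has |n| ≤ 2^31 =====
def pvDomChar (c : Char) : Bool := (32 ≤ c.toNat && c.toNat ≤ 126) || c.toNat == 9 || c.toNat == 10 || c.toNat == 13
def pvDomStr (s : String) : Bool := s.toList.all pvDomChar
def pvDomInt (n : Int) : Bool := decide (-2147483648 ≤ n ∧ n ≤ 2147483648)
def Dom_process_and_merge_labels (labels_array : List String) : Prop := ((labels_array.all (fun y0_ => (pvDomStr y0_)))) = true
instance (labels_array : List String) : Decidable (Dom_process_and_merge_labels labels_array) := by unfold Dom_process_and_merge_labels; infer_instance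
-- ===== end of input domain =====

-- B replaces Counter/max/items-filter majority finding by sort-then-run-length scan; alternative algorithm, same results.

-- shared helper: '[label.strip() for label in label_str.split(",")]' (both Pythons compute this list)
def pvLabels (label_str : String) : List String :=
  (PySem.Chars.splitOn label_str.toList [',']).map (fun cs => String.mk (PySem.Chars.strip cs))

-- ===== PORT A =====
def pvAStep (st : Int × Int × List (Option String)) (label_str : String) : Int × Int × List (Option String) :=
  let labels := pvLabels label_str
  let label_counts := PySem.Dict.counter labels
  match PySem.List.max? label_counts.values (fun v => v) with
  | none => st  -- unreachable: labels is never empty (max() would raise only on an empty sequence)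
  | some max_freq =>
    let majority_labels := (label_counts.items.filter (fun p => p.2 == max_freq)).map Prod.fst
    if majority_labels.length == 1 then
      (st.1 + 1, st.2.1, st.2.2 ++ [majority_labels.head?])
    else
      (st.1, st.2.1 + 1, st.2.2 ++ [none])

def process_and_merge_labels (labels_array : List String) : Int × Int × List (Option String) :=
  labels_array.foldl pvAStep (0, 0, [])

-- ===== PORT B =====
-- the two while loops of Source B: walk the sorted list run by run, tracking (best_len, best, ties)
def pvRunScan : List String → Nat × Option String × Nat → Nat × Option String × Nat
  | [], st => st
  | x :: rest, st =>
    let run := 1 + (rest.takeWhile (fun y => y == x)).length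
    let rest' := rest.dropWhile (fun y => y == x)
    pvRunScan rest'
      (if st.1 < run then (run, some x, 1)
       else if run == st.1 then (st.1, st.2.1, st.2.2 + 1) else st)
  termination_by l => l.length
  decreasing_by exact Nat.lt_succ_of_le (List.length_dropWhile_le _ _)

def pvBStep (st : Int × Int × List (Option String)) (label_str : String) : Int × Int × List (Option String) :=
  let labels := PySem.List.sorted (pvLabels label_str) (fun x => x) false
  let r := pvRunScan labels (0, none, 0)
  if r.2.2 == 1 then
    (st.1 + 1, st.2.1, st.2.2 ++ [r.2.1])
  else
    (st.1, st.2.1 + 1, st.2.2 ++ [none])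

def process_and_merge_labels_alt (labels_array : List String) : Int × Int × List (Option String) :=
  labels_array.foldl pvBStep (0, 0, [])

-- ===== PRECONDITION & SPEC =====
def Spec_process_and_merge_labels (labels_array : List String) (out : Int × Int × List (Option String)) : Prop := out = process_and_merge_labels_alt labels_array
instance (labels_array : List String) (out : Int × Int × List (Option String)) : Decidable (Spec_process_and_merge_labels labels_array out) := by unfold Spec_process_and_merge_labels; infer_instance

-- ===== CLAIM (what is proved, stated in full; the proofs are below) =====
def Claim_equal_process_and_merge_labels : Prop := ∀ (labels_array : List String), Dom_process_and_merge_labels labels_array → Spec_process_and_merge_labels labels_array (process_and_merge_labels labels_array)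

-- ===== LEMMAS AND PROOFS =====

-- split(',') always yields at least one piece
lemma pv_go_len (sep : List Char) : ∀ (fuel : Nat) (l cur : List Char) (acc : List (List Char)),
    acc.length + 1 ≤ (PySem.Chars.splitOn.go sep fuel l cur acc).length := by
  intro fuel
  induction fuel with
  | zero => intro l cur acc; simp [PySem.Chars.splitOn.go]
  | succ f ih =>
    intro l cur acc
    cases l with
    | nil => simp [PySem.Chars.splitOn.go]
    | cons c rest =>
      rw [PySem.Chars.splitOn.go]
      split
      · have h := ih (List.drop sep.length (c :: rest)) [] (cur.reverse :: acc)
        simp only [List.length_cons] at h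
        omega
      · exact ih rest (c :: cur) acc

lemma pvLabels_ne_nil (s : String) : pvLabels s ≠ [] := by
  have h := pv_go_len [','] (s.toList.length + 1) s.toList [] []
  simp only [List.length_nil] at h
  unfold pvLabels PySem.Chars.splitOn
  intro hc
  rw [List.map_eq_nil_iff] at hc
  rw [hc] at h
  simp at h

-- the run-scan step on one (value, run-length) pair
def pvStep (st : Nat × Option String × Nat) (p : String × Nat) : Nat × Option String × Nat :=
  if st.1 < p.2 then (p.2, some p.1, 1)
  else if p.2 == st.1 then (st.1, st.2.1, st.2.2 + 1) else st

-- PySem.Set.update over a prefix-disjoint accumulator splits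
lemma pv_update_disj : ∀ (l s t : List String), (∀ a ∈ l, a ∉ s) →
    PySem.Set.update (s ++ t) l = s ++ PySem.Set.update t l := by
  intro l
  induction l with
  | nil => intro s t _; rfl
  | cons a l ih =>
    intro s t hd
    have ha : a ∉ s := hd a (by simp)
    have hadd : PySem.Set.add (s ++ t) a = s ++ PySem.Set.add t a := by
      simp only [PySem.Set.add, PySem.Set.contains, List.contains_append]
      have : s.contains a = false := by simpa using ha
      rw [this]
      simp only [Bool.false_or]
      split <;> simp
    show PySem.Set.update (PySem.Set.add (s ++ t) a) l = _
    rw [hadd]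
    exact ih s _ (fun b hb => hd b (by simp [hb]))

lemma pv_update_const (x : String) : ∀ (t : List String), (∀ y ∈ t, y = x) →
    PySem.Set.update [x] t = [x] := by
  intro t
  induction t with
  | nil => intro _; rfl
  | cons a t ih =>
    intro hd
    have hax : a = x := hd a (by simp)
    have : PySem.Set.add [x] a = [x] := by
      simp [PySem.Set.add, PySem.Set.contains, hax]
    show PySem.Set.update (PySem.Set.add [x] a) t = [x]
    rw [this]
    exact ih (fun y hy => hd y (by simp [hy]))

lemma pv_update_append (s : List String) (l₁ l₂ : List String) :
    PySem.Set.update s (l₁ ++ l₂) = PySem.Set.update (PySem.Set.update s l₁) l₂ := by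
  simp [PySem.Set.update, List.foldl_append]

lemma pv_drop_gt (x : String) (rest : List String) (hxle : ∀ y ∈ rest, x ≤ y)
    (hp : rest.Pairwise (· ≤ ·)) :
    ∀ y ∈ rest.dropWhile (fun y => y == x), x < y := by
  intro y hy
  cases hz : rest.dropWhile (fun y => y == x) with
  | nil => rw [hz] at hy; cases hy
  | cons z zs =>
    rw [hz] at hy
    have hne : rest.dropWhile (fun y => y == x) ≠ [] := by rw [hz]; simp
    have h0 := List.head_dropWhile_not (fun y => y == x) hne
    simp only [hz] at h0
    have hzx : z ≠ x := by simpa using h0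
    have hzmem : z ∈ rest := List.Sublist.mem (by rw [hz]; simp) (List.dropWhile_sublist _)
    have hxz : x < z := lt_of_le_of_ne (hxle z hzmem) (Ne.symm hzx)
    rcases List.mem_cons.mp hy with h | h
    · subst h; exact hxz
    · have hp' : (z :: zs).Pairwise (· ≤ ·) := by
        rw [← hz]; exact hp.sublist (List.dropWhile_sublist _)
      exact lt_of_lt_of_le hxz ((List.pairwise_cons.mp hp').1 y h)

-- run scan on a sorted list = fold of pvStep over the (distinct value, count) pairs
lemma pv_runScan_eq : ∀ (n : Nat) (l : List String), l.length ≤ n → l.Pairwise (· ≤ ·) →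
    ∀ st, pvRunScan l st =
      ((PySem.Set.ofList l).map (fun v => (v, l.count v))).foldl pvStep st := by
  intro n
  induction n with
  | zero =>
    intro l hl _ st
    have : l = [] := List.length_eq_zero_iff.mp (Nat.le_zero.mp hl)
    subst this
    rw [pvRunScan]
    rfl
  | succ n ih =>
    intro l hl hp st
    cases l with
    | nil => rw [pvRunScan]; rfl
    | cons x rest =>
      have hrestp : rest.Pairwise (· ≤ ·) := hp.of_cons
      have hxle : ∀ y ∈ rest, x ≤ y := fun y hy => (List.pairwise_cons.mp hp).1 y hy
      have hsplit : rest = rest.takeWhile (fun y => y == x) ++ rest.dropWhile (fun y => y == x) :=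
        (List.takeWhile_append_dropWhile).symm
      have htx : ∀ y ∈ rest.takeWhile (fun y => y == x), y = x := by
        intro y hy
        simpa using List.mem_takeWhile_imp hy
      have hr'p : (rest.dropWhile (fun y => y == x)).Pairwise (· ≤ ·) :=
        hrestp.sublist (List.dropWhile_sublist _)
      have hr'gt := pv_drop_gt x rest hxle hrestp
      have hr'ne : ∀ y ∈ rest.dropWhile (fun y => y == x), y ≠ x :=
        fun y hy => ne_of_gt (hr'gt y hy)
      have hxnr' : x ∉ rest.dropWhile (fun y => y == x) := fun h => (hr'ne x h) rfl
      -- counts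
      have hcx : (x :: rest).count x = 1 + (rest.takeWhile (fun y => y == x)).length := by
        conv_lhs => rw [hsplit]
        rw [List.count_cons_self, List.count_append]
        have h1 : (rest.takeWhile (fun y => y == x)).count x
            = (rest.takeWhile (fun y => y == x)).length := by
          rw [List.count_eq_length]
          intro y hy; exact (htx y hy).symm
        have h2 : (rest.dropWhile (fun y => y == x)).count x = 0 :=
          List.count_eq_zero.mpr hxnr'
        omega
      have hcv : ∀ v ∈ rest.dropWhile (fun y => y == x),
          (x :: rest).count v = (rest.dropWhile (fun y => y == x)).count v := by
        intro v hv
        have hvx : v ≠ x := hr'ne v hv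
        conv_lhs => rw [hsplit]
        rw [List.count_cons, List.count_append]
        have h1 : (rest.takeWhile (fun y => y == x)).count v = 0 := by
          rw [List.count_eq_zero]
          intro hvt; exact hvx (htx v hvt)
        simp [h1, Ne.symm hvx]
      -- set decomposition
      have hset : PySem.Set.ofList (x :: rest)
          = x :: PySem.Set.ofList (rest.dropWhile (fun y => y == x)) := by
        have h0 : PySem.Set.ofList (x :: rest) = PySem.Set.update [x] rest := rfl
        rw [h0]
        conv_lhs => rw [hsplit]
        rw [pv_update_append, pv_update_const x _ htx]
        have := pv_update_disj (rest.dropWhile (fun y => y == x)) [x] []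
          (by intro a ha; simp [hr'ne a ha])
        simpa using this
      have hlen : (rest.dropWhile (fun y => y == x)).length ≤ n := by
        have h1 := List.length_dropWhile_le (fun y => y == x) rest
        have h2 : rest.length + 1 ≤ n + 1 := by simpa using hl
        omega
      rw [pvRunScan, hset, List.map_cons, List.foldl_cons,
        ih _ hlen hr'p]
      have hmap : List.map (fun v => (v, (x :: rest).count v))
            (PySem.Set.ofList (rest.dropWhile (fun y => y == x)))
          = List.map (fun v => (v, (rest.dropWhile (fun y => y == x)).count v))
            (PySem.Set.ofList (rest.dropWhile (fun y => y == x))) := by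
        apply List.map_congr_left
        intro v hv
        rw [hcv v (by simpa using (PySem.Set.mem_ofList _ v).mp hv)]
      rw [hmap]
      congr 1
      rw [hcx]
      rfl

-- characterisation of the fold of pvStep
lemma pv_fold_char : ∀ (P : List (String × Nat)) (bl : Nat) (b : Option String) (tn : Nat),
    P.foldl pvStep (bl, b, tn) =
      (if bl < P.foldl (fun m p => max m p.2) bl
       then (P.foldl (fun m p => max m p.2) bl,
             (P.find? (fun p => p.2 == P.foldl (fun m p => max m p.2) bl)).map Prod.fst,
             P.countP (fun p => p.2 == P.foldl (fun m p => max m p.2) bl))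
       else (bl, b, tn + P.countP (fun p => p.2 == bl))) := by
  intro P
  induction P with
  | nil => intro bl b tn; simp
  | cons p P ih =>
    intro bl b tn
    have hM : ∀ m : Nat, (p :: P).foldl (fun m q => max m q.2) m = P.foldl (fun m q => max m q.2) (max m p.2) := by
      intro m; rfl
    have hMle : ∀ m : Nat, m ≤ P.foldl (fun m q => max m q.2) m := by
      intro m
      have := (PySem.List.le_foldl_max_nat P (fun q => q.2) m).1
      simpa using this
    rcases Nat.lt_trichotomy bl p.2 with hlt | heq | hgt
    · -- strict improvement
      rw [List.foldl_cons]
      have hstep : pvStep (bl, b, tn) p = (p.2, some p.1, 1) := by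
        simp [pvStep, hlt]
      rw [hstep, ih]
      have hMeq : (p :: P).foldl (fun m q => max m q.2) bl = P.foldl (fun m q => max m q.2) p.2 := by
        rw [hM]; congr 1; omega
      have hble : p.2 ≤ P.foldl (fun m q => max m q.2) p.2 := hMle p.2
      rcases eq_or_lt_of_le hble with hMeq2 | hMlt
      · -- M = p.2 : head attains the max
        rw [if_neg (by omega)]
        rw [if_pos (by omega), hMeq]
        rw [List.find?_cons, List.countP_cons]
        simp [← hMeq2]
        omega
      · -- p.2 < M
        rw [if_pos hMlt, if_pos (by omega), hMeq]
        rw [List.find?_cons, List.countP_cons]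
        have hne : ¬ (p.2 == P.foldl (fun m q => max m q.2) p.2) = true := by
          simp; omega
        simp only [hne, Bool.false_eq_true, if_false]
        simp
    · -- equal: ties += 1
      rw [List.foldl_cons]
      have hstep : pvStep (bl, b, tn) p = (bl, b, tn + 1) := by
        simp [pvStep, heq]
      rw [hstep, ih]
      have hMeq : (p :: P).foldl (fun m q => max m q.2) bl = P.foldl (fun m q => max m q.2) bl := by
        rw [hM]; congr 1; omega
      rw [hMeq]
      by_cases hc : bl < P.foldl (fun m q => max m q.2) bl
      · rw [if_pos hc, if_pos hc]
        rw [List.find?_cons, List.countP_cons]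
        have hne : ¬ (p.2 == P.foldl (fun m q => max m q.2) bl) = true := by
          simp; omega
        simp only [hne, Bool.false_eq_true, if_false]
        simp
      · rw [if_neg hc, if_neg hc]
        rw [List.countP_cons]
        have hpe : (p.2 == bl) = true := by simp [heq]
        simp only [hpe, if_true]
        simp only [Prod.mk.injEq]
        refine ⟨trivial, trivial, by omega⟩
    · -- smaller: no change
      rw [List.foldl_cons]
      have hstep : pvStep (bl, b, tn) p = (bl, b, tn) := by
        have h1 : ¬ bl < p.2 := by omega
        have h2 : (p.2 == bl) = false := by simp; omega
        simp [pvStep, h1, h2]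
      rw [hstep, ih]
      have hMeq : (p :: P).foldl (fun m q => max m q.2) bl = P.foldl (fun m q => max m q.2) bl := by
        rw [hM]; congr 1; omega
      rw [hMeq]
      by_cases hc : bl < P.foldl (fun m q => max m q.2) bl
      · rw [if_pos hc, if_pos hc]
        rw [List.find?_cons, List.countP_cons]
        have hne : ¬ (p.2 == P.foldl (fun m q => max m q.2) bl) = true := by
          simp; omega
        simp only [hne, Bool.false_eq_true, if_false]
        simp
      · rw [if_neg hc, if_neg hc]
        rw [List.countP_cons]
        have hne : ¬ (p.2 == bl) = true := by simp; omega
        simp [hne]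

-- A's per-string step equals B's per-string step
lemma pv_step_eq (st : Int × Int × List (Option String)) (s : String) :
    pvAStep st s = pvBStep st s := by
  have hne := pvLabels_ne_nil s
  simp only [pvAStep, pvBStep]
  generalize pvLabels s = ls at hne ⊢
  have hsp : (PySem.List.sorted ls (fun x => x) false).Pairwise (· ≤ ·) := by
    simpa using PySem.List.sorted_pairwise ls (fun x => x)
  have hperm : (PySem.List.sorted ls (fun x => x) false).Perm ls :=
    PySem.List.sorted_perm ls (fun x => x) false
  rw [pv_runScan_eq (PySem.List.sorted ls (fun x => x) false).length _ (le_refl _) hsp,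
    pv_fold_char]
  set sls := PySem.List.sorted ls (fun x => x) false with hsls
  set K := PySem.Set.ofList sls with hKdef
  set P := K.map (fun v => (v, sls.count v)) with hPdef
  set M := P.foldl (fun m p => max m p.2) 0 with hMdef
  have hcnt : ∀ v, sls.count v = ls.count v := fun v => hperm.count_eq v
  have hksmem : ∀ v, v ∈ PySem.Set.ofList ls ↔ v ∈ K := by
    intro v
    simp [hKdef, hsls, PySem.Set.mem_ofList, PySem.List.mem_sorted]
  have hpermK : (PySem.Set.ofList ls).Perm K :=
    (List.perm_ext_iff_of_nodup (PySem.Set.nodup_ofList ls) (PySem.Set.nodup_ofList _)).mpr hksmem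
  have hvals : (PySem.Dict.counter ls).values
      = (PySem.Set.ofList ls).map (fun k => ((ls.count k : Int))) := by
    show (PySem.Dict.counter ls).items.map Prod.snd = _
    rw [PySem.Dict.items_counter, List.map_map]
    rfl
  have hlsne : PySem.Set.ofList ls ≠ [] := by
    obtain ⟨a, ha⟩ := List.exists_mem_of_ne_nil ls hne
    exact List.ne_nil_of_mem ((PySem.Set.mem_ofList ls a).mpr ha)
  cases hmx : PySem.List.max? (PySem.Dict.counter ls).values (fun v => v) with
  | none =>
    exfalso
    rw [PySem.List.max?_eq_none_iff, hvals, List.map_eq_nil_iff] at hmx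
    exact hlsne hmx
  | some mx =>
    have hub : ∀ k ∈ PySem.Set.ofList ls, ((ls.count k : Int)) ≤ mx := by
      intro k hk
      have := PySem.List.max?_isMax hmx ((ls.count k : Int))
        (by rw [hvals]; exact List.mem_map_of_mem hk)
      simpa using this
    have hmem : ∃ k0 ∈ PySem.Set.ofList ls, mx = ((ls.count k0 : Int)) := by
      have := PySem.List.max?_mem hmx
      rw [hvals] at this
      obtain ⟨k0, hk0, he⟩ := List.mem_map.mp this
      exact ⟨k0, hk0, he.symm⟩
    have hMfold : M = (K.map (fun v => sls.count v)).foldl max 0 := by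
      rw [hMdef, hPdef, List.foldl_map, List.foldl_map]
    have hMub : ∀ v ∈ K, sls.count v ≤ M := by
      intro v hv
      rw [hMfold]
      have := (PySem.List.le_foldl_max_nat (K.map (fun v => sls.count v)) (fun n => n) 0).2
      simpa using this _ (List.mem_map_of_mem hv)
    have hM0 : 0 < M := by
      obtain ⟨a, ha⟩ := List.exists_mem_of_ne_nil ls hne
      have ha' : a ∈ K := (hksmem a).mp ((PySem.Set.mem_ofList ls a).mpr ha)
      have h1 : 0 < sls.count a := by
        rw [hcnt]
        exact List.count_pos_iff.mpr ha
      exact lt_of_lt_of_le h1 (hMub a ha')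
    have hMmem : ∃ v ∈ K, M = sls.count v := by
      rw [hMfold]
      rcases PySem.List.foldl_max_mem (K.map (fun v => sls.count v)) 0 with h | h
      · rw [← hMfold] at h
        omega
      · obtain ⟨v, hv, he⟩ := List.mem_map.mp h
        exact ⟨v, hv, he.symm⟩
    have hMeq : mx = (M : Int) := by
      obtain ⟨k0, hk0, he0⟩ := hmem
      obtain ⟨v0, hv0, he1⟩ := hMmem
      have h1 : mx ≤ (M : Int) := by
        rw [he0]
        have := hMub k0 ((hksmem k0).mp hk0)
        rw [hcnt] at this
        exact_mod_cast this
      have h2 : (M : Int) ≤ mx := by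
        rw [he1]
        rw [hcnt]
        exact hub v0 ((hksmem v0).mpr hv0)
      omega
    have hpred : ∀ v, (((ls.count v : Int)) == mx) = (sls.count v == M) := by
      intro v
      rw [Bool.eq_iff_iff, beq_iff_eq, beq_iff_eq, hcnt, hMeq]
      exact Int.natCast_inj
    have hmaj : ((PySem.Dict.counter ls).items.filter (fun p => p.2 == mx)).map Prod.fst
        = (PySem.Set.ofList ls).filter (fun k => ((ls.count k : Int)) == mx) := by
      rw [PySem.Dict.items_counter, List.filter_map, List.map_map]
      rw [show ((fun (p : String × Int) => p.2 == mx) ∘ fun k => (k, (ls.count k : Int)))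
          = (fun k => ((ls.count k : Int) == mx)) from rfl]
      rw [show (Prod.fst ∘ fun k => (k, (ls.count k : Int))) = id from rfl]
      rw [List.map_id]
    dsimp only
    rw [hmaj]
    have hT : P.countP (fun p => p.2 == M) = K.countP (fun v => sls.count v == M) := by
      rw [hPdef, List.countP_map]
      rfl
    have hlen : ((PySem.Set.ofList ls).filter (fun k => ((ls.count k : Int)) == mx)).length
        = K.countP (fun v => sls.count v == M) := by
      rw [← List.countP_eq_length_filter, hpermK.countP_eq]
      apply List.countP_congr
      intro v _
      exact Bool.eq_iff_iff.mp (hpred v)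
    rw [if_pos hM0]
    by_cases hone : K.countP (fun v => sls.count v == M) = 1
    · obtain ⟨a, hfa⟩ := List.length_eq_one_iff.mp (hlen.trans hone)
      have hamem' := List.mem_filter.mp (show a ∈ _ by rw [hfa]; simp)
      have hpa : (sls.count a == M) = true := by
        rw [← hpred a]
        exact hamem'.2
      have hfind : P.find? (fun p => p.2 == M) = some (a, sls.count a) := by
        rw [hPdef, List.find?_map]
        rw [show ((fun (p : String × Nat) => p.2 == M) ∘ fun v => (v, sls.count v))
            = (fun v => sls.count v == M) from rfl]
        have hsome : ∃ b, K.find? (fun v => sls.count v == M) = some b :=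
          Option.isSome_iff_exists.mp
            (List.find?_isSome.mpr ⟨a, (hksmem a).mp hamem'.1, hpa⟩)
        obtain ⟨b, hb⟩ := hsome
        have hbmem := List.mem_of_find?_eq_some hb
        have hbp := List.find?_some hb
        have hba : b = a := by
          obtain ⟨c, hc⟩ := List.length_eq_one_iff.mp
            ((List.countP_eq_length_filter).symm.trans hone)
          have hbf : b ∈ K.filter (fun v => sls.count v == M) :=
            List.mem_filter.mpr ⟨hbmem, hbp⟩
          have haf : a ∈ K.filter (fun v => sls.count v == M) :=
            List.mem_filter.mpr ⟨(hksmem a).mp hamem'.1, hpa⟩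
          rw [hc] at hbf haf
          simp at hbf haf
          rw [hbf, haf]
        rw [hb, hba]
        rfl
      rw [hfind]
      have hcond1 : ((((PySem.Set.ofList ls).filter
          (fun k => ((ls.count k : Int)) == mx)).length == 1)) = true := by
        rw [hfa]
        rfl
      rw [hcond1]
      simp only [hT, hone]
      rw [hfa]
      rfl
    · have hcond1 : ((((PySem.Set.ofList ls).filter
          (fun k => ((ls.count k : Int)) == mx)).length == 1)) = false := by
        rw [hlen]
        simpa using hone
      have hcond2 : (P.countP (fun p => p.2 == M) == 1) = false := by
        rw [hT]
        simpa using hone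
      rw [hcond1, hcond2]
      simp

-- ===== VERDICT (by name: the statement is the Claim_ definition above) =====
theorem process_and_merge_labels_spec : Claim_equal_process_and_merge_labels := by
  intro labels_array _
  unfold Spec_process_and_merge_labels process_and_merge_labels process_and_merge_labels_alt
  exact List.foldl_ext _ _ _ (fun st x _ => pv_step_eq st x)
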